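-- pv_equiv track=rewrite | github.com/OlderMutt/HeaderGuardian-Burpsuite-Pro-Extension | HeaderGuardianPassive.py | checkMissingHeaders
-- ===== SOURCE A (Python) =====
-- def checkMissingHeaders(headers):
--     # Define expected headers
--     expected_headers = [
--         'Access-Control-Allow-Origin', 'X-Content-Type-Options', 'Permissions-Policy',
--         'Cross-Origin-Opener-Policy', 'X-Frame-Options', 'Referrer-Policy',
--         'Strict-Transport-Security', 'Content-Security-Policy', 'X-DNS-Prefetch-Control',
--         'Cross-Origin-Embedder-Policy', 'Cross-Origin-Resource-Policy', 'X-XSS-Protection'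
--     ]
--
--     missing_headers = []
--     for header in expected_headers:
--         if not any(h.startswith(header) for h in headers):
--             missing_headers.append(header)
--
--     return missing_headers
-- ===== SOURCE B (Python) =====
-- def checkMissingHeaders(headers):
--     # One pass over headers: record which expected names are covered, then
--     # filter the fixed expected list against the covered set.
--     expected_headers = [
--         'Access-Control-Allow-Origin', 'X-Content-Type-Options', 'Permissions-Policy',
--         'Cross-Origin-Opener-Policy', 'X-Frame-Options', 'Referrer-Policy',
--         'Strict-Transport-Security', 'Content-Security-Policy', 'X-DNS-Prefetch-Control',
--         'Cross-Origin-Embedder-Policy', 'Cross-Origin-Resource-Policy', 'X-XSS-Protection'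
--     ]
--     matched = set()
--     for h in headers:
--         for e in expected_headers:
--             if h.startswith(e):
--                 matched.add(e)
--     return [e for e in expected_headers if e not in matched]
-- ===== Notes on version B (the rewrite author's own statement) =====
-- stated objective: alternative
-- what changed: Inverts the loop nesting: one pass over the input headers builds a set of covered expected names (dropping the per-expected rescan of all headers), then the fixed expected list is filtered against that set.
import Mathlib
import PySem

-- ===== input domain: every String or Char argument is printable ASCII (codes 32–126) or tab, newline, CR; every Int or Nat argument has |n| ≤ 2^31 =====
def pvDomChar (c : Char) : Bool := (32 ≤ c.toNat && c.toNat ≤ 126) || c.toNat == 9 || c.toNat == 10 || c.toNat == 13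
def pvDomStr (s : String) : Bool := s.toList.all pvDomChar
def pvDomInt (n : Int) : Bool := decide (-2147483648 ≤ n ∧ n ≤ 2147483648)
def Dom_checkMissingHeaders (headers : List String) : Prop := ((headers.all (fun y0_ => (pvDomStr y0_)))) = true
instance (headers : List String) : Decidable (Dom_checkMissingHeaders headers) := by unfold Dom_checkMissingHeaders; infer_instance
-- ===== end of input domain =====

-- B inverts the loop nesting: one pass over the input headers accumulates a set of covered
-- expected names, then the fixed expected list is filtered against that set (objective: alternative).


-- ===== PORT A =====
-- the fixed expected-headers list (shared literal data of both programs)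
def expectedHeaders : List String := [
  "Access-Control-Allow-Origin", "X-Content-Type-Options", "Permissions-Policy",
  "Cross-Origin-Opener-Policy", "X-Frame-Options", "Referrer-Policy",
  "Strict-Transport-Security", "Content-Security-Policy", "X-DNS-Prefetch-Control",
  "Cross-Origin-Embedder-Policy", "Cross-Origin-Resource-Policy", "X-XSS-Protection"]

-- A: for each expected header, scan all input headers with any(); append it if no match
def checkMissingHeaders (headers : List String) : List String :=
  expectedHeaders.foldl
    (fun missing header =>
      if !(headers.any (fun h => PySem.Str.startswith h header)) then missing ++ [header]
      else missing)
    []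

-- ===== PORT B =====
-- B: one pass over the input headers building the covered set, then filter the expected list
def checkMissingHeaders_alt (headers : List String) : List String :=
  let matched : PySem.Set String :=
    headers.foldl
      (fun s h =>
        expectedHeaders.foldl
          (fun s e => if PySem.Str.startswith h e then PySem.Set.add s e else s) s)
      PySem.Set.empty
  expectedHeaders.filter (fun e => !(PySem.Set.contains matched e))

-- ===== PRECONDITION & SPEC =====
def Spec_checkMissingHeaders (headers : List String) (out : List String) : Prop := out = checkMissingHeaders_alt headers
instance (headers : List String) (out : List String) : Decidable (Spec_checkMissingHeaders headers out) := by unfold Spec_checkMissingHeaders; infer_instance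

-- ===== CLAIM (what is proved, stated in full; the proofs are below) =====
def Claim_equal_checkMissingHeaders : Prop := ∀ (headers : List String), Dom_checkMissingHeaders headers → Spec_checkMissingHeaders headers (checkMissingHeaders headers)

-- ===== LEMMAS AND PROOFS =====

-- membership after the inner loop over the expected list
lemma mem_inner (h : String) (s : PySem.Set String) (x : String) (l : List String) :
    x ∈ l.foldl (fun s e => if PySem.Str.startswith h e then PySem.Set.add s e else s) s ↔
      x ∈ s ∨ (x ∈ l ∧ PySem.Str.startswith h x = true) := by
  induction l generalizing s with
  | nil => simp
  | cons e l ih =>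
    simp only [List.foldl_cons]
    by_cases he : PySem.Str.startswith h e = true
    · rw [if_pos he, ih]
      constructor
      · rintro (hm | ⟨hm, hst⟩)
        · rcases (PySem.Set.mem_add s e x).mp hm with hx | rfl
          · exact Or.inl hx
          · exact Or.inr ⟨List.mem_cons_self, he⟩
        · exact Or.inr ⟨List.mem_cons_of_mem _ hm, hst⟩
      · rintro (hx | ⟨hm, hst⟩)
        · exact Or.inl ((PySem.Set.mem_add s e x).mpr (Or.inl hx))
        · rcases List.mem_cons.mp hm with rfl | hm
          · exact Or.inl ((PySem.Set.mem_add s x x).mpr (Or.inr rfl))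
          · exact Or.inr ⟨hm, hst⟩
    · rw [if_neg he, ih]
      constructor
      · rintro (hx | ⟨hm, hst⟩)
        · exact Or.inl hx
        · exact Or.inr ⟨List.mem_cons_of_mem _ hm, hst⟩
      · rintro (hx | ⟨hm, hst⟩)
        · exact Or.inl hx
        · rcases List.mem_cons.mp hm with rfl | hm
          · exact absurd hst he
          · exact Or.inr ⟨hm, hst⟩

-- membership in the matched set after the outer pass over the input headers
lemma mem_matched (headers : List String) (s : PySem.Set String) (x : String) :
    x ∈ headers.foldl
        (fun s h => expectedHeaders.foldl
          (fun s e => if PySem.Str.startswith h e then PySem.Set.add s e else s) s) s ↔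
      x ∈ s ∨ (x ∈ expectedHeaders ∧ ∃ h ∈ headers, PySem.Str.startswith h x = true) := by
  induction headers generalizing s with
  | nil => simp
  | cons h hs ih =>
    simp only [List.foldl_cons, ih, mem_inner]
    constructor
    · rintro ((hx | ⟨hm, hst⟩) | ⟨hm, g, hg, hst⟩)
      · tauto
      · exact Or.inr ⟨hm, h, by simp, hst⟩
      · exact Or.inr ⟨hm, g, by simp [hg], hst⟩
    · rintro (hx | ⟨hm, g, hg, hst⟩)
      · tauto
      · rcases List.mem_cons.mp hg with rfl | hg
        · tauto
        · exact Or.inr ⟨hm, g, hg, hst⟩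

-- ===== VERDICT (by name: the statement is the Claim_ definition above) =====
theorem checkMissingHeaders_spec : Claim_equal_checkMissingHeaders := by
  intro headers _
  unfold Spec_checkMissingHeaders checkMissingHeaders checkMissingHeaders_alt
  rw [show (fun (missing : List String) header =>
      if !(headers.any (fun h => PySem.Str.startswith h header)) then missing ++ [header]
      else missing) = (fun missing header =>
      if (!(headers.any (fun h => PySem.Str.startswith h header))) = true then missing ++ [id header]
      else missing) from rfl,
     PySem.List.foldl_append_if]
  simp only [List.map_id, List.nil_append]
  apply List.filter_congr
  intro e he
  rw [Bool.not_inj_iff, Bool.eq_iff_iff, List.any_eq_true]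
  simp only [PySem.Set.contains, List.contains_iff_mem]
  rw [mem_matched]
  simp only [PySem.Set.empty, List.not_mem_nil, false_or]
  exact Iff.intro (fun hx => ⟨he, hx⟩) (fun hx => hx.2)
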